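-- pv_equiv track=rewrite | github.com/rohan-hitchcock/comp30024-artificial-intelligence | depreciated/stack.py | get_print_dict_from_groups
-- ===== SOURCE A (Python) =====
-- def get_print_dict_from_groups(groups):
--     """ Returns a dictionary of this boards target groups suitible for printing by the
--         functions in util.py
--
--         Returns:
--             A dictionary of tuples representing each groups explosion radius positions.
--             The value is the string to be printed on the board
--
--     """
--
--     c_dict = dict()
--     for label, s in groups.items():
--         for tup in s:
--             if tup in c_dict:
--                 c_dict[tup] = str(c_dict[tup]) + "/" + str(label)
--             else:
--                 c_dict[tup] = label
--
--     return c_dict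
-- ===== SOURCE B (Python) =====
-- def get_print_dict_from_groups(groups):
--     acc = {}
--     for label, s in groups.items():
--         for tup in s:
--             acc.setdefault(tup, []).append(label)
--     return {tup: "/".join(str(l) for l in labels) for tup, labels in acc.items()}
-- ===== Notes on version B (the rewrite author's own statement) =====
-- stated objective: idiomatic
-- what changed: B accumulates position -> list-of-labels with dict.setdefault in one pass and then builds the result by joining each list with '/', instead of A's in-place string concatenation with an in-dict membership branch on every element.
import Mathlib
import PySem

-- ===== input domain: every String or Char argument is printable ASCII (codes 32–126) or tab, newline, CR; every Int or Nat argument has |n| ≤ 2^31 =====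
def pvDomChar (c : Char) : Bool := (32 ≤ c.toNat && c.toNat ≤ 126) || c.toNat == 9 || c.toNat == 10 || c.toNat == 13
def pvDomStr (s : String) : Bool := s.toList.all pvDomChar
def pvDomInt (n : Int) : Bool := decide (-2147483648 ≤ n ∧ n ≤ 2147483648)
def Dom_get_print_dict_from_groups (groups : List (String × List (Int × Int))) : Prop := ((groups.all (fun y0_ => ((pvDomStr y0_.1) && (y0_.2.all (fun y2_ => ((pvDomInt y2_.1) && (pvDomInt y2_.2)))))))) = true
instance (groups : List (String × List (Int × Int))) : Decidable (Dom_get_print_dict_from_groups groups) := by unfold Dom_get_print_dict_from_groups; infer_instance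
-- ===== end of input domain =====

-- B replaces A's string-concatenation-with-membership-branch loop by a setdefault/append
-- accumulation pass followed by a '/'-join pass (idiomatic decomposition; same cost).


-- ===== PORT A =====
-- 'if tup in c_dict: c_dict[tup] = str(c_dict[tup]) + "/" + str(label) else: c_dict[tup] = label'
-- (str(·) on a string is the identity, so it is dropped in the port)
def pvStepA (c : PySem.Dict (Int × Int) String) (label : String) (tup : Int × Int) :
    PySem.Dict (Int × Int) String :=
  match c.get? tup with
  | some v => c.insert tup (v ++ "/" ++ label)
  | none   => c.insert tup label

def get_print_dict_from_groups (groups : List (String × List (Int × Int))) : List (Int × Int × String) :=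
  ((groups.foldl (fun c p => p.2.foldl (fun c tup => pvStepA c p.1 tup) c) PySem.Dict.empty).items).map
    (fun q => (q.1.1, q.1.2, q.2))

-- ===== PORT B =====
-- 'acc.setdefault(tup, []).append(label)' = modify tup [] (· ++ [label])
def get_print_dict_from_groups_alt (groups : List (String × List (Int × Int))) : List (Int × Int × String) :=
  let acc := groups.foldl
    (fun d p => p.2.foldl (fun d tup => d.modify tup [] (· ++ [p.1])) d)
    (PySem.Dict.empty : PySem.Dict (Int × Int) (List String))
  acc.items.map (fun q => (q.1.1, q.1.2, PySem.Str.join "/" q.2))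

-- ===== PRECONDITION & SPEC =====
def Spec_get_print_dict_from_groups (groups : List (String × List (Int × Int))) (out : List (Int × Int × String)) : Prop := out = get_print_dict_from_groups_alt groups
instance (groups : List (String × List (Int × Int))) (out : List (Int × Int × String)) : Decidable (Spec_get_print_dict_from_groups groups out) := by unfold Spec_get_print_dict_from_groups; infer_instance

-- ===== CLAIM (what is proved, stated in full; the proofs are below) =====
def Claim_equal_get_print_dict_from_groups : Prop := ∀ (groups : List (String × List (Int × Int))), Dom_get_print_dict_from_groups groups → Spec_get_print_dict_from_groups groups (get_print_dict_from_groups groups)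

-- ===== LEMMAS AND PROOFS =====

-- "/".join of a single label is that label
theorem pv_join_singleton (l : String) : PySem.Str.join "/" [l] = l := by
  simp [PySem.Str.join, PySem.Chars.join, List.intercalate]

theorem pv_intercalate_append (sep x : List Char) : ∀ (a : List Char) (t : List (List Char)),
    List.intercalate sep ((a::t) ++ [x]) = List.intercalate sep (a::t) ++ sep ++ x := by
  intro a t
  induction t generalizing a with
  | nil => simp [List.intercalate, List.intersperse]
  | cons b t ih =>
    have h1 : List.intercalate sep (a :: b :: (t ++ [x]))
        = a ++ sep ++ List.intercalate sep (b :: (t ++ [x])) := by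
      simp [List.intercalate, List.intersperse]
    have h2 : List.intercalate sep (a :: b :: t) = a ++ sep ++ List.intercalate sep (b :: t) := by
      simp [List.intercalate, List.intersperse]
    simpa [h1, h2, List.append_assoc] using congrArg (fun z => a ++ sep ++ z) (ih b)

-- appending one more label to a nonempty list extends the join by "/" ++ label
theorem pv_join_append (ls : List String) (h : ls ≠ []) (x : String) :
    PySem.Str.join "/" (ls ++ [x]) = PySem.Str.join "/" ls ++ "/" ++ x := by
  cases ls with
  | nil => simp at h
  | cons a t =>
    simp only [PySem.Str.join, PySem.Chars.join, List.map_append, List.map_cons, List.map_nil]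
    rw [show a.toList :: List.map String.toList t ++ [x.toList]
        = (a.toList :: List.map String.toList t) ++ [x.toList] from rfl, pv_intercalate_append]
    rw [List.append_assoc, String.ofList_append,
        (@String.toList_append "/" x).symm, String.ofList_toList]
    simp [String.append_assoc]

-- the invariant: A's dict is B's accumulator with every label list joined by "/"
def pvRel (dA : PySem.Dict (Int × Int) String) (dB : PySem.Dict (Int × Int) (List String)) : Prop :=
  dA.items = dB.items.map (fun q => (q.1, PySem.Str.join "/" q.2))
  ∧ dB.keys.Nodup ∧ ∀ p ∈ dB.items, p.2 ≠ []

theorem pvRel_keys {dA dB} (h : pvRel dA dB) : dA.keys = dB.keys := by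
  simp only [PySem.Dict.keys, h.1, List.map_map]
  rfl

theorem pvRel_step {dA dB} (h : pvRel dA dB) (lbl : String) (tup : Int × Int) :
    pvRel (pvStepA dA lbl tup) (dB.modify tup [] (· ++ [lbl])) := by
  obtain ⟨hitems, hnd, hne⟩ := h
  have hkeys := pvRel_keys ⟨hitems, hnd, hne⟩
  have hndA : dA.keys.Nodup := hkeys ▸ hnd
  have hcontains : dA.contains tup = dB.contains tup := by
    rw [PySem.Dict.contains_eq_decide_mem_keys, PySem.Dict.contains_eq_decide_mem_keys, hkeys]
  by_cases hc : dB.contains tup = true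
  · -- tup already present: B appends lbl to its list, A appends "/" ++ lbl to its string
    have hcA : dA.contains tup = true := by rw [hcontains]; exact hc
    have hsome : (dB.get? tup).isSome := by rw [← PySem.Dict.contains_eq_isSome_get?]; exact hc
    obtain ⟨ls, hls⟩ := Option.isSome_iff_exists.mp hsome
    have hmem : (tup, ls) ∈ dB.items := PySem.Dict.mem_items_of_get?_eq_some dB hls
    have hlsne : ls ≠ [] := hne _ hmem
    have hmemA : (tup, PySem.Str.join "/" ls) ∈ dA.items := by
      rw [hitems]; exact List.mem_map.mpr ⟨(tup, ls), hmem, rfl⟩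
    have hgetA : dA.get? tup = some (PySem.Str.join "/" ls) :=
      PySem.Dict.get?_of_mem_items dA hmemA hndA
    have hgetD : dB.getD tup [] = ls := PySem.Dict.getD_of_get?_eq_some dB [] hls
    simp only [pvStepA, hgetA, PySem.Dict.modify, hgetD]
    refine ⟨?_, ?_, ?_⟩
    · rw [PySem.Dict.items_insert_of_contains dA _ hcA,
          PySem.Dict.items_insert_of_contains dB _ hc, hitems, List.map_map, List.map_map]
      apply List.map_congr_left
      intro p hp
      by_cases hpk : p.1 == tup
      · simp [Function.comp, hpk, pv_join_append ls hlsne lbl]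
      · simp [Function.comp, hpk]
    · rw [PySem.Dict.keys_insert_of_contains dB _ hc]; exact hnd
    · intro p hp
      rcases (PySem.Dict.mem_items_insert _ _ _ _).mp hp with rfl | ⟨hp', _⟩
      · simp
      · exact hne _ hp'
  · -- fresh key: both sides append a new entry, and join "/" [lbl] = lbl
    have hc' : dB.contains tup = false := by simpa using hc
    have hcA : dA.contains tup = false := by rw [hcontains]; exact hc'
    have hnone : dA.get? tup = none := by
      have := PySem.Dict.contains_eq_isSome_get? (d := dA) (k := tup)
      rw [hcA] at this
      exact Option.not_isSome_iff_eq_none.mp (by rw [← this]; simp)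
    have hgetD : dB.getD tup [] = [] := PySem.Dict.getD_of_not_contains dB [] hc'
    simp only [pvStepA, hnone, PySem.Dict.modify, hgetD, List.nil_append]
    refine ⟨?_, ?_, ?_⟩
    · rw [PySem.Dict.items_insert_of_not_contains dA _ hcA,
          PySem.Dict.items_insert_of_not_contains dB _ hc', hitems, List.map_append]
      simp only [List.map_cons, List.map_nil, pv_join_singleton]
    · rw [PySem.Dict.keys_insert_of_not_contains dB _ hc']
      refine List.nodup_append.mpr ⟨hnd, List.nodup_singleton _, ?_⟩
      intro a ha b hb
      simp only [List.mem_singleton] at hb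
      subst hb
      intro heq
      subst heq
      have hmem : a ∈ dB.keys := ha
      have : dB.contains a = true := by
        rw [PySem.Dict.contains_eq_decide_mem_keys]; simpa using hmem
      rw [this] at hc'; simp at hc'
    · intro p hp
      rcases (PySem.Dict.mem_items_insert _ _ _ _).mp hp with rfl | ⟨hp', _⟩
      · simp
      · exact hne _ hp'

theorem pvRel_inner (lbl : String) (tups : List (Int × Int)) :
    ∀ dA dB, pvRel dA dB →
    pvRel (tups.foldl (fun c tup => pvStepA c lbl tup) dA)
          (tups.foldl (fun d tup => d.modify tup [] (· ++ [lbl])) dB) := by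
  induction tups with
  | nil => intro dA dB h; exact h
  | cons t ts ih =>
    intro dA dB h
    exact ih _ _ (pvRel_step h lbl t)

theorem pvRel_outer (groups : List (String × List (Int × Int))) :
    ∀ dA dB, pvRel dA dB →
    pvRel (groups.foldl (fun c p => p.2.foldl (fun c tup => pvStepA c p.1 tup) c) dA)
          (groups.foldl (fun d p => p.2.foldl (fun d tup => d.modify tup [] (· ++ [p.1])) d) dB) := by
  induction groups with
  | nil => intro dA dB h; exact h
  | cons g gs ih =>
    intro dA dB h
    exact ih _ _ (pvRel_inner g.1 g.2 dA dB h)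

-- ===== VERDICT (by name: the statement is the Claim_ definition above) =====
theorem get_print_dict_from_groups_spec : Claim_equal_get_print_dict_from_groups := by
  intro groups _
  have h0 : pvRel PySem.Dict.empty PySem.Dict.empty := by
    refine ⟨rfl, ?_, by intro p hp; cases hp⟩
    simp [PySem.Dict.keys_empty]
  have h := pvRel_outer groups PySem.Dict.empty PySem.Dict.empty h0
  unfold Spec_get_print_dict_from_groups get_print_dict_from_groups get_print_dict_from_groups_alt
  rw [h.1, List.map_map]
  rfl
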